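-- pv_equiv track=rewrite | github.com/christinhabibiyanq366/discord-echo-bot | acp_bridge.py | _append_text_chunk
-- ===== SOURCE A (Python) =====
-- def _append_text_chunk(parts: list[str], chunk: str) -> list[str]:
--     if not chunk:
--         return parts
--
--     existing = "".join(parts)
--     if not existing:
--         parts.append(chunk)
--         return parts
--
--     if existing.endswith(chunk):
--         return parts
--
--     max_overlap = min(len(existing), len(chunk))
--     for overlap in range(max_overlap, 0, -1):
--         if existing.endswith(chunk[:overlap]):
--             parts.append(chunk[overlap:])
--             return parts
--
--     parts.append(chunk)
--     return parts
-- ===== SOURCE B (Python) =====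
-- def _append_text_chunk(parts: list[str], chunk: str) -> list[str]:
--     if not chunk:
--         return parts
--
--     existing = "".join(parts)
--     if not existing:
--         parts.append(chunk)
--         return parts
--
--     # Scan candidate overlap start positions left-to-right, jumping with
--     # str.find to occurrences of chunk's first character; the first position
--     # whose tail equals the corresponding chunk prefix gives the longest overlap.
--     start = len(existing) - len(chunk)
--     if start < 0:
--         start = 0
--     first = chunk[:1]
--     i = existing.find(first, start)
--     while i != -1:
--         k = len(existing) - i
--         if chunk[:k] == existing[i:]:
--             rest = chunk[k:]
--             if rest:
--                 parts.append(rest)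
--             return parts
--         i = existing.find(first, i + 1)
--     parts.append(chunk)
--     return parts
-- ===== Notes on version B (the rewrite author's own statement) =====
-- stated objective: faster
-- what changed: Instead of trying every overlap length from the top with an O(overlap) chunk-prefix slice + endswith per length, B scans candidate overlap start positions left-to-right, jumping with str.find to occurrences of the chunk's first character and doing one direct tail-vs-prefix comparison per candidate; the full-overlap case falls out of the same scan instead of a separate endswith check.
import Mathlib
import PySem

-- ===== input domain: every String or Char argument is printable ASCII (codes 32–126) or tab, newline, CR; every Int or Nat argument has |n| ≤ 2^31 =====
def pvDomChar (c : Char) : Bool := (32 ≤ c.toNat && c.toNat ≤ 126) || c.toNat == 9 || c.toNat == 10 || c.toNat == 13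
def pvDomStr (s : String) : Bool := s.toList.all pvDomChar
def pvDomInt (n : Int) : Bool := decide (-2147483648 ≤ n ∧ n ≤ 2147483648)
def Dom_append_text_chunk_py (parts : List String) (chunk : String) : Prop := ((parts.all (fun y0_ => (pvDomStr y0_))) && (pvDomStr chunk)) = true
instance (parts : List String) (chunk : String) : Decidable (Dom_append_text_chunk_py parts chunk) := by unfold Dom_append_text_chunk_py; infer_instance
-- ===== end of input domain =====

-- B replaces A's descending per-length slice+endswith search by a left-to-right find-jump scan over
-- candidate overlap start positions (objective: faster by a large constant factor on typical text).
-- Both Pythons mutate `parts` identically (at most one append); the theorems are about the return value.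

-- ===== PORT A =====
-- the 'for overlap in range(max_overlap, 0, -1)' loop with its early return, as Option of the found overlap
def atcLoopA (existing chunk : String) : List Int → Option Int
  | [] => none
  | o :: rest =>
    if PySem.Str.endswith existing (PySem.Str.slice chunk none (some o)) then some o
    else atcLoopA existing chunk rest

def append_text_chunk_py (parts : List String) (chunk : String) : List String :=
  if PySem.Str.len chunk = 0 then parts
  else
    let existing := PySem.Str.join "" parts
    if PySem.Str.len existing = 0 then parts ++ [chunk]
    else if PySem.Str.endswith existing chunk then parts
    else
      let maxOverlap : Int := min (PySem.Str.len existing) (PySem.Str.len chunk)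
      match atcLoopA existing chunk (PySem.List.pyRange maxOverlap 0 (-1)) with
      | some o => parts ++ [PySem.Str.slice chunk (some o) none]
      | none => parts ++ [chunk]

-- ===== PORT B =====
-- the 'while i != -1' find-jump loop of Source B; fuel bounds the iteration count (i strictly increases)
def atcLoopB (parts : List String) (existing chunk first : String) (i : Int) : Nat → List String
  | 0 => parts ++ [chunk]
  | fuel + 1 =>
    if i = -1 then parts ++ [chunk]
    else
      let k : Int := PySem.Str.len existing - i
      if PySem.Str.slice chunk none (some k) = PySem.Str.slice existing (some i) none then
        let rest := PySem.Str.slice chunk (some k) none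
        if PySem.Str.len rest = 0 then parts else parts ++ [rest]
      else atcLoopB parts existing chunk first (PySem.Str.findFrom existing first (i + 1)) fuel

def append_text_chunk_py_alt (parts : List String) (chunk : String) : List String :=
  if PySem.Str.len chunk = 0 then parts
  else
    let existing := PySem.Str.join "" parts
    if PySem.Str.len existing = 0 then parts ++ [chunk]
    else
      let start : Int := max 0 (PySem.Str.len existing - PySem.Str.len chunk)
      let first := PySem.Str.slice chunk none (some 1)
      atcLoopB parts existing chunk first (PySem.Str.findFrom existing first start)
        (existing.toList.length + 1)

-- ===== PRECONDITION & SPEC =====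
def Spec_append_text_chunk_py (parts : List String) (chunk : String) (out : List String) : Prop := out = append_text_chunk_py_alt parts chunk
instance (parts : List String) (chunk : String) (out : List String) : Decidable (Spec_append_text_chunk_py parts chunk out) := by unfold Spec_append_text_chunk_py; infer_instance

-- ===== CLAIM (what is proved, stated in full; the proofs are below) =====
def Claim_equal_append_text_chunk_py : Prop := ∀ (parts : List String) (chunk : String), Dom_append_text_chunk_py parts chunk → Spec_append_text_chunk_py parts chunk (append_text_chunk_py parts chunk)

-- ===== LEMMAS AND PROOFS =====

-- reference search: ascFind E C m scans overlap start positions i = |E|-m, ..., |E|-1 ascending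
-- (equivalently overlap lengths o = m, ..., 1 descending) and returns the first i whose tail matches
def ascFind (E C : List Char) : Nat → Option Nat
  | 0 => none
  | o + 1 =>
    if E.drop (E.length - (o + 1)) = C.take (o + 1) then some (E.length - (o + 1))
    else ascFind E C o

theorem ascFind_sound' (E C : List Char) (m : Nat) (hm : m ≤ E.length) (j : Nat)
    (h : ascFind E C m = some j) :
    E.length - m ≤ j ∧ j < E.length ∧ E.drop j = C.take (E.length - j) := by
  induction m with
  | zero => simp [ascFind] at h
  | succ o ih =>
    rw [ascFind] at h
    split at h
    · rename_i hc
      have hj : E.length - (o + 1) = j := by injection h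
      subst hj
      refine ⟨le_refl _, by omega, ?_⟩
      have h1 : E.length - (E.length - (o + 1)) = o + 1 := by omega
      rw [h1]; exact hc
    · have := ih (by omega) h
      exact ⟨by omega, this.2.1, this.2.2⟩

theorem ascFind_skip (E C : List Char) (m m' : Nat) (hm : m ≤ E.length) (h' : m' ≤ m)
    (hno : ∀ j, E.length - m ≤ j → j < E.length - m' → ¬ E.drop j = C.take (E.length - j)) :
    ascFind E C m = ascFind E C m' := by
  induction m with
  | zero => have : m' = 0 := by omega
            rw [this]
  | succ o ih =>
    rcases Nat.eq_or_lt_of_le h' with rfl | hlt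
    · rfl
    · rw [ascFind, if_neg, ih (by omega) (by omega) (fun j h1 h2 => hno j (by omega) h2)]
      intro hc
      have h1 : E.length - (E.length - (o + 1)) = o + 1 := by omega
      exact hno _ (le_refl _) (by omega) (by rw [h1]; exact hc)

theorem match_head (E C : List Char) (j : Nat) (hj : j < E.length) (hC : C ≠ [])
    (h : E.drop j = C.take (E.length - j)) : C.take 1 <+: E.drop j := by
  obtain ⟨c0, cs, rfl⟩ : ∃ c0 cs, C = c0 :: cs := by
    cases C with
    | nil => exact absurd rfl hC
    | cons a b => exact ⟨a, b, rfl⟩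
  have h1 : E.length - j = (E.length - j - 1) + 1 := by omega
  rw [h, h1]
  simp

theorem drop_suffix_drop (E : List Char) (i j : Nat) (hij : i ≤ j) : E.drop j <:+ E.drop i := by
  have : (E.drop i).drop (j - i) = E.drop j := by rw [List.drop_drop]; congr 1; omega
  exact this ▸ List.drop_suffix _ _

theorem loopA_eq (existing chunk : String) (m : Nat)
    (hmE : m ≤ existing.toList.length) (hmC : m ≤ chunk.toList.length) :
    atcLoopA existing chunk (PySem.List.pyRange (m : Int) 0 (-1)) =
      (ascFind existing.toList chunk.toList m).map
        (fun i => ((existing.toList.length - i : Nat) : Int)) := by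
  induction m with
  | zero => rw [PySem.List.pyRange_neg_one_eq_nil (by omega)]; rfl
  | succ o ih =>
    rw [PySem.List.pyRange_neg_one_cons (by omega), atcLoopA]
    have hcast : ((o + 1 : Nat) : Int) - 1 = (o : Int) := by push_cast; ring
    rw [hcast]
    have hcond : (PySem.Str.endswith existing (PySem.Str.slice chunk none (some ((o + 1 : Nat) : Int))) = true)
        ↔ existing.toList.drop (existing.toList.length - (o + 1)) = chunk.toList.take (o + 1) := by
      rw [PySem.Str.endswith_eq, PySem.Str.toList_slice, PySem.Chars.slice_eq_listSlice,
        PySem.List.slice_to _ (by positivity), PySem.Chars.endswith_iff]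
      have : ((o + 1 : Nat) : Int).toNat = o + 1 := by omega
      rw [this, List.suffix_iff_eq_drop, List.length_take, Nat.min_eq_left hmC]
      exact ⟨fun h => h.symm, fun h => h.symm⟩
    rw [ascFind]
    by_cases h : existing.toList.drop (existing.toList.length - (o + 1)) = chunk.toList.take (o + 1)
    · rw [if_pos (hcond.mpr h), if_pos h, Option.map_some]
      congr 1
      omega
    · rw [if_neg (fun hb => h (hcond.mp hb)), if_neg h, ih (by omega) (by omega)]

theorem loopB_eq (parts : List String) (existing chunk : String)
    (hC : chunk.toList ≠ []) (fuel : Nat) : ∀ (i : Nat),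
    i ≤ existing.toList.length → existing.toList.length - i < fuel →
    atcLoopB parts existing chunk (PySem.Str.slice chunk none (some 1))
        (PySem.Str.findFrom existing (PySem.Str.slice chunk none (some 1)) (i : Int)) fuel =
      match ascFind existing.toList chunk.toList (existing.toList.length - i) with
      | some j =>
          if chunk.toList.length ≤ existing.toList.length - j then parts
          else parts ++ [PySem.Str.slice chunk (some ((existing.toList.length - j : Nat) : Int)) none]
      | none => parts ++ [chunk] := by
  set E := existing.toList with hE
  set C := chunk.toList with hCl
  have hfirst : (PySem.Str.slice chunk none (some 1)).toList = C.take 1 := by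
    rw [PySem.Str.toList_slice, PySem.Chars.slice_eq_listSlice, PySem.List.slice_to _ (by norm_num)]
    rfl
  induction fuel with
  | zero => intro i hi hf; omega
  | succ fuel ih =>
    intro i hi hf
    set r : Int := PySem.Str.findFrom existing (PySem.Str.slice chunk none (some 1)) (i : Int) with hr
    have hrC : r = PySem.Chars.findFrom E (C.take 1) (i : Int) none := by
      rw [hr, PySem.Str.findFrom_eq, hfirst]
    by_cases hneg : r = -1
    -- no further occurrence of the first character: no match at all from position i on
    · have hninf : ¬ (C.take 1 <:+: E.drop i) := by
        rw [← PySem.Chars.findFrom_natCast_eq_neg_one_iff E (C.take 1) i hi, ← hrC]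
        exact hneg
      have hnone : ascFind E C (E.length - i) = none := by
        rw [ascFind_skip E C _ 0 (by omega) (by omega)]
        · rfl
        · intro j h1 h2 hmatch
          exact hninf ((match_head E C j (by omega) hC hmatch).isInfix.trans
            (drop_suffix_drop E i j (by omega)).isInfix)
      rw [hnone, atcLoopB, if_pos hneg]
    -- an occurrence at r
    · obtain ⟨hir, hpre, hmin⟩ := PySem.Chars.findFrom_natCast_spec E (C.take 1) i hi (hrC ▸ hneg)
      rw [← hrC] at hir hpre hmin
      have hr0 : 0 ≤ r := le_trans (by omega) hir
      set rn : Nat := r.toNat with hrn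
      have hrr : r = (rn : Int) := by omega
      have hrlen : rn < E.length := by
        by_contra hcon
        have hnil : E.drop rn = [] := List.drop_eq_nil_of_le (by omega)
        rw [hnil] at hpre
        have h1 : C.take 1 = [] := List.prefix_nil.mp hpre
        rcases List.take_eq_nil_iff.mp h1 with h2 | h2
        · exact absurd h2 (by norm_num)
        · exact hC h2
      have hlenE : PySem.Str.len existing = (E.length : Int) := by
        rw [PySem.Str.len_eq]
      have hnomatch_lt : ∀ j, i ≤ j → j < rn → ¬ E.drop j = C.take (E.length - j) := by
        intro j h1 h2 hmatch
        exact hmin j h1 h2 (match_head E C j (by omega) hC hmatch)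
      rw [atcLoopB, if_neg hneg]
      have hcond : (PySem.Str.slice chunk none (some (PySem.Str.len existing - r)) =
          PySem.Str.slice existing (some r) none)
          ↔ E.drop rn = C.take (E.length - rn) := by
        rw [String.ext_iff, PySem.Str.toList_slice, PySem.Str.toList_slice,
          PySem.Chars.slice_eq_listSlice, PySem.Chars.slice_eq_listSlice,
          PySem.List.slice_to _ (by omega), PySem.List.slice_from _ hr0]
        have h1 : (PySem.Str.len existing - r).toNat = E.length - rn := by
          rw [hlenE]; omega
        rw [h1, ← hrn]
        exact ⟨fun h => h.symm, fun h => h.symm⟩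
      by_cases hmatch : E.drop rn = C.take (E.length - rn)
      · rw [if_pos (hcond.mpr hmatch)]
        have hasc : ascFind E C (E.length - i) = some rn := by
          rw [ascFind_skip E C (E.length - i) (E.length - rn) (by omega) (by omega)
            (fun j h1 h2 h3 => hnomatch_lt j (by omega) (by omega) h3)]
          have h2 : E.length - rn = (E.length - rn - 1) + 1 := by omega
          rw [h2, ascFind]
          rw [if_pos (by rw [← h2]; have h3 : E.length - (E.length - rn) = rn := by omega
                         rw [h3]; exact hmatch)]
          rw [← h2]
          congr 1
          omega
        rw [hasc]
        have hred : (match some rn with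
          | some j => if C.length ≤ E.length - j then parts
              else parts ++ [PySem.Str.slice chunk (some ((E.length - j : Nat) : Int)) none]
          | none => parts ++ [chunk]) =
            if C.length ≤ E.length - rn then parts
            else parts ++ [PySem.Str.slice chunk (some ((E.length - rn : Nat) : Int)) none] := rfl
        rw [hred]
        have hrest : (PySem.Str.slice chunk (some (PySem.Str.len existing - r)) none).toList
            = C.drop (E.length - rn) := by
          rw [PySem.Str.toList_slice, PySem.Chars.slice_eq_listSlice,
            PySem.List.slice_from _ (by rw [hlenE]; omega)]
          congr 1
          rw [hlenE]; omega
        have hlenrest : PySem.Str.len (PySem.Str.slice chunk (some (PySem.Str.len existing - r)) none)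
            = ((C.length - (E.length - rn) : Nat) : Int) := by
          rw [PySem.Str.len_eq, hrest, List.length_drop]
        by_cases hempty : C.length ≤ E.length - rn
        · rw [if_pos (by rw [hlenrest]; omega), if_pos hempty]
        · rw [if_neg (by rw [hlenrest]; omega), if_neg hempty]
          have : PySem.Str.len existing - r = ((E.length - rn : Nat) : Int) := by
            rw [hlenE]; omega
          rw [this]
      · rw [if_neg (fun h => hmatch (hcond.mp h))]
        have hstep : r + 1 = ((rn + 1 : Nat) : Int) := by omega
        rw [hstep, ih (rn + 1) (by omega) (by omega)]
        have hskip : ascFind E C (E.length - i) = ascFind E C (E.length - (rn + 1)) := by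
          apply ascFind_skip E C _ _ (by omega) (by omega)
          intro j h1 h2 h3
          rcases Nat.lt_or_ge j rn with h4 | h4
          · exact hnomatch_lt j (by omega) h4 h3
          · have : j = rn := by omega
            exact hmatch (this ▸ h3)
        rw [hskip]

-- ===== VERDICT (by name: the statement is the Claim_ definition above) =====
theorem append_text_chunk_py_spec : Claim_equal_append_text_chunk_py := by
  intro parts chunk _
  show append_text_chunk_py parts chunk = append_text_chunk_py_alt parts chunk
  simp only [append_text_chunk_py, append_text_chunk_py_alt]
  by_cases h0 : PySem.Str.len chunk = 0
  · rw [if_pos h0, if_pos h0]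
  · rw [if_neg h0, if_neg h0]
    set existing := PySem.Str.join "" parts with hex
    set E := existing.toList with hE
    set C := chunk.toList with hC
    have hlenE : PySem.Str.len existing = (E.length : Int) := by rw [PySem.Str.len_eq]
    have hEL : existing.toList.length = E.length := rfl
    have hCL : chunk.toList.length = C.length := rfl
    have hlenC : PySem.Str.len chunk = (C.length : Int) := by rw [PySem.Str.len_eq]
    have hCne : C ≠ [] := by
      intro h
      exact h0 (by rw [hlenC, h]; rfl)
    by_cases h1 : PySem.Str.len existing = 0
    · rw [if_pos h1, if_pos h1]
    · rw [if_neg h1, if_neg h1]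
      have hEpos : 0 < E.length := by
        rcases Nat.eq_zero_or_pos E.length with h | h
        · exact absurd (by rw [hlenE, h]; rfl) h1
        · exact h
      set m : Nat := min E.length C.length with hm
      have hstart : (max 0 (PySem.Str.len existing - PySem.Str.len chunk) : Int)
          = ((E.length - m : Nat) : Int) := by
        rw [hlenE, hlenC]; omega
      rw [hstart, loopB_eq parts existing chunk hCne (E.length + 1) (E.length - m)
        (by rw [hEL]; omega) (by rw [hEL]; omega)]
      have him : E.length - (E.length - m) = m := by omega
      rw [him]
      have hendiff : (PySem.Str.endswith existing chunk = true) ↔ C <:+ E := by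
        rw [PySem.Str.endswith_eq, PySem.Chars.endswith_iff]
      by_cases h2 : PySem.Str.endswith existing chunk
      · rw [if_pos h2]
        have hsuf : C <:+ E := hendiff.mp h2
        have hCle : C.length ≤ E.length := hsuf.length_le
        have hmC : m = C.length := by omega
        have hdrop : E.drop (E.length - m) = C.take m := by
          rw [hmC, List.take_length]
          exact (List.suffix_iff_eq_drop.mp hsuf).symm
        have hm1 : m = (m - 1) + 1 := by
          have : 0 < C.length := List.length_pos_iff.mpr hCne
          omega
        have hasc : ascFind E C m = some (E.length - m) := by
          rw [hm1, ascFind, ← hm1, if_pos hdrop]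
        rw [hasc]
        have hred : (match some (E.length - m) with
          | some j => if C.length ≤ E.length - j then parts
              else parts ++ [PySem.Str.slice chunk (some ((E.length - j : Nat) : Int)) none]
          | none => parts ++ [chunk]) =
            if C.length ≤ E.length - (E.length - m) then parts
            else parts ++ [PySem.Str.slice chunk (some ((E.length - (E.length - m) : Nat) : Int)) none] := rfl
        rw [hred, if_pos (by omega)]
      · rw [if_neg h2]
        have hmax : (min (PySem.Str.len existing) (PySem.Str.len chunk) : Int) = ((m : Nat) : Int) := by
          rw [hlenE, hlenC]; omega
        rw [hmax, loopA_eq existing chunk m (by rw [hEL]; omega) (by rw [hCL]; omega)]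
        cases hasc : ascFind E C m with
        | none => rfl
        | some j =>
          obtain ⟨hjm, hjlen, hjmatch⟩ := ascFind_sound' E C m (by omega) j hasc
          have hnotle : ¬ (C.length ≤ E.length - j) := by
            intro hle
            have heq : E.length - j = C.length := by omega
            have hj' : j = E.length - C.length := by omega
            rw [heq, List.take_length] at hjmatch
            rw [hj'] at hjmatch
            exact h2 (hendiff.mpr (List.suffix_iff_eq_drop.mpr hjmatch.symm))
          show parts ++ [PySem.Str.slice chunk (some ((existing.toList.length - j : Nat) : Int)) none]
            = if chunk.toList.length ≤ existing.toList.length - j then parts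
              else parts ++ [PySem.Str.slice chunk (some ((existing.toList.length - j : Nat) : Int)) none]
          rw [if_neg hnotle]
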